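-- pv_equiv track=rewrite | github.com/ephrem-ketachew/data-structure-and-algorithms | maximize-win---sliding-window.py | maximizeWin
-- ===== SOURCE A (Python) =====
-- from typing import List
-- from bisect import bisect_right
--
-- def maximizeWin(prizePositions: List[int], k: int) -> int:
--     n = len(prizePositions)
--     prefix = [0] * n
--     left = 0
--     res = 0
--
--     for right in range(n):
--         while prizePositions[right] - prizePositions[left] > k:
--             left += 1
--         current_window = right - left + 1
--
--         prefix[right] = max(current_window, prefix[right - 1]) if right > 0 else current_window
--
--     for i in range(n):
--         end = prizePositions[i] + k
--         j = bisect_right(prizePositions, end)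
--         first_window = prefix[i - 1] if i > 0 else 0
--         second_window = j - i
--         res = max(res, first_window + second_window)
--
--     return res
-- ===== SOURCE B (Python) =====
-- from typing import List
--
-- def maximizeWin(prizePositions: List[int], k: int) -> int:
--     # One fused O(n) pass: a forward monotonic pointer j replaces bisect_right,
--     # and a running 'best' replaces the prefix array. Assumes sorted input, k >= 0.
--     n = len(prizePositions)
--     left = 0
--     j = 0
--     best = 0   # best single-window size within prizePositions[:i]
--     res = 0
--     for i in range(n):
--         end = prizePositions[i] + k
--         while j < n and prizePositions[j] <= end:
--             j += 1
--         res = max(res, best + (j - i))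
--         while prizePositions[i] - prizePositions[left] > k:
--             left += 1
--         best = max(best, i - left + 1)
--     return res
-- ===== Notes on version B (the rewrite author's own statement) =====
-- stated objective: faster
-- what changed: Replaces A's two passes (prefix array + per-index bisect_right binary search) by one fused linear pass that advances a monotonic forward pointer j instead of bisecting and keeps a running best instead of the prefix array.
-- outside the precondition, e.g. on maximizeWin([0, 2, 2, -2, 5, 0], 1): A returns 6, B returns 5
import Mathlib
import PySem

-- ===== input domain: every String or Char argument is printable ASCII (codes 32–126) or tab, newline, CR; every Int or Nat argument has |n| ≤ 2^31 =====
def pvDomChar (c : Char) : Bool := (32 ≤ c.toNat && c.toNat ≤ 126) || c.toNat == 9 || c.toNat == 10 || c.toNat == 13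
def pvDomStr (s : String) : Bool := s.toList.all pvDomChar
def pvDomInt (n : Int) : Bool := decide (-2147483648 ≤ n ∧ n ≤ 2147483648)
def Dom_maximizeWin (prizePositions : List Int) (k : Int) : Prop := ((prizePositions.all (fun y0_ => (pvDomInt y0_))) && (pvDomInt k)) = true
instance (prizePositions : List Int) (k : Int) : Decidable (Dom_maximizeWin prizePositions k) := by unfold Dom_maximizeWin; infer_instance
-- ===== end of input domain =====

-- B replaces A's bisect_right binary searches and prefix array by one fused pass with a
-- monotonic forward pointer and a running best (a different, single-pass algorithm).

-- ===== PORT A =====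
-- while prizePositions[right] - prizePositions[left] > k: left += 1
-- (the `left < length` guard only totalises the port; inside Pre_ Python never runs past the end)
def advLeftA (pos : List Int) (k pr : Int) (left : Nat) : Nat :=
  if left < pos.length then
    if pr - pos.getD left 0 > k then advLeftA pos k pr (left + 1) else left
  else left
termination_by pos.length - left
decreasing_by omega

-- bisect_right(a, x): lo=0, hi=len(a); while lo<hi: mid=(lo+hi)//2; x<a[mid] → hi=mid else lo=mid+1
def bsGo (pos : List Int) (x : Int) (lo hi : Nat) : Nat :=
  if lo < hi then
    let mid := (lo + hi) / 2
    if x < pos.getD mid 0 then bsGo pos x lo mid else bsGo pos x (mid + 1) hi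
  else lo
termination_by hi - lo
decreasing_by all_goals omega

def bisectRight (pos : List Int) (x : Int) : Nat := bsGo pos x 0 pos.length

-- first loop: builds prefix[right] = max(current_window, prefix[right-1]); entries are
-- written left to right (the Python preallocates [0]*n; appending is the same writes in order)
def loop1A (pos : List Int) (k : Int) (r left : Nat) (pre : List Int) : List Int :=
  if r < pos.length then
    let l' := advLeftA pos k (pos.getD r 0) left
    let cur : Int := (r : Int) - (l' : Int) + 1
    let p := if r > 0 then max cur (pre.getD (r - 1) 0) else cur
    loop1A pos k (r + 1) l' (pre ++ [p])
  else pre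
termination_by pos.length - r
decreasing_by omega

-- second loop: res = max(res, prefix[i-1] + (bisect_right(pos, pos[i]+k) - i))
def loop2A (pos : List Int) (k : Int) (pre : List Int) (i : Nat) (res : Int) : Int :=
  if i < pos.length then
    let e := pos.getD i 0 + k
    let j := bisectRight pos e
    let fw := if i > 0 then pre.getD (i - 1) 0 else 0
    let sw : Int := (j : Int) - (i : Int)
    loop2A pos k pre (i + 1) (max res (fw + sw))
  else res
termination_by pos.length - i
decreasing_by omega

def maximizeWin (prizePositions : List Int) (k : Int) : Int :=
  loop2A prizePositions k (loop1A prizePositions k 0 0 []) 0 0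

-- ===== PORT B =====
-- while j < n and prizePositions[j] <= end: j += 1
def advJ (pos : List Int) (e : Int) (j : Nat) : Nat :=
  if j < pos.length then
    if pos.getD j 0 ≤ e then advJ pos e (j + 1) else j
  else j
termination_by pos.length - j
decreasing_by omega

-- while prizePositions[i] - prizePositions[left] > k: left += 1 (guard totalises, as in A)
def advLeftB (pos : List Int) (k pi : Int) (left : Nat) : Nat :=
  if left < pos.length then
    if pi - pos.getD left 0 > k then advLeftB pos k pi (left + 1) else left
  else left
termination_by pos.length - left
decreasing_by omega

def loopB (pos : List Int) (k : Int) (i left j : Nat) (best res : Int) : Int :=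
  if i < pos.length then
    let e := pos.getD i 0 + k
    let j' := advJ pos e j
    let res' := max res (best + ((j' : Int) - (i : Int)))
    let l' := advLeftB pos k (pos.getD i 0) left
    let best' := max best ((i : Int) - (l' : Int) + 1)
    loopB pos k (i + 1) l' j' best' res'
  else res
termination_by pos.length - i
decreasing_by omega

def maximizeWin_alt (prizePositions : List Int) (k : Int) : Int :=
  loopB prizePositions k 0 0 0 0 0

-- ===== PRECONDITION & SPEC =====
-- Pre_ restricts to the function's natural domain (LeetCode 2555): a sorted prizePositions and
-- k ≥ 0 (on a nonempty list with k < 0 both programs raise IndexError; on unsorted input A's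
-- bisect-based value is an artefact of binary search on unsorted data).
def Pre_maximizeWin (prizePositions : List Int) (k : Int) : Prop :=
  List.Pairwise (· ≤ ·) prizePositions ∧ (prizePositions = [] ∨ 0 ≤ k)
instance (prizePositions : List Int) (k : Int) : Decidable (Pre_maximizeWin prizePositions k) := by
  unfold Pre_maximizeWin; infer_instance

def pvWitness_maximizeWin : List Int × Int := ([1, 1, 2, 8, 8, 9], 2)

def Spec_maximizeWin (prizePositions : List Int) (k : Int) (out : Int) : Prop := out = maximizeWin_alt prizePositions k
instance (prizePositions : List Int) (k : Int) (out : Int) : Decidable (Spec_maximizeWin prizePositions k out) := by unfold Spec_maximizeWin; infer_instance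

-- ===== CLAIM (what is proved, stated in full; the proofs are below) =====
def Claim_equal_maximizeWin : Prop := ∀ (prizePositions : List Int) (k : Int), Dom_maximizeWin prizePositions k → Pre_maximizeWin prizePositions k → Spec_maximizeWin prizePositions k (maximizeWin prizePositions k)

-- ===== LEMMAS AND PROOFS =====
-- ---- proof helpers ----

-- the number of elements ≤ x in a ≤-sorted list, as the length of the initial segment
def idxLE (pos : List Int) (x : Int) : Nat := (pos.takeWhile (fun v => decide (v ≤ x))).length

lemma idxLE_le_length (pos : List Int) (x : Int) : idxLE pos x ≤ pos.length := by
  simpa [idxLE] using (List.takeWhile_sublist (p := fun v => decide (v ≤ x)) (l := pos)).length_le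

lemma idxLE_lt_le (pos : List Int) (x : Int) :
    ∀ m, m < idxLE pos x → pos.getD m 0 ≤ x := by
  induction pos with
  | nil => intro m hm; simp [idxLE] at hm
  | cons a t ih =>
    intro m hm
    by_cases ha : a ≤ x
    · cases m with
      | zero => simpa using ha
      | succ m' =>
        simp only [idxLE, List.takeWhile_cons, ha, decide_true] at hm
        simpa using ih m' (by simpa [idxLE] using Nat.lt_of_succ_lt_succ hm)
    · simp [idxLE, ha] at hm
  
lemma idxLE_stop (pos : List Int) (x : Int) (h : idxLE pos x < pos.length) :
    ¬ pos.getD (idxLE pos x) 0 ≤ x := by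
  induction pos with
  | nil => simp at h
  | cons a t ih =>
    by_cases ha : a ≤ x
    · simp only [idxLE, List.takeWhile_cons, ha, decide_true, List.length_cons] at h ⊢
      simpa [idxLE] using ih (by simpa [idxLE] using Nat.lt_of_succ_lt_succ h)
    · simp [idxLE, ha]

lemma sorted_getD (pos : List Int) (hs : List.Pairwise (· ≤ ·) pos)
    {m m' : Nat} (h1 : m ≤ m') (h2 : m' < pos.length) :
    pos.getD m 0 ≤ pos.getD m' 0 := by
  rcases Nat.eq_or_lt_of_le h1 with rfl | hlt
  · exact le_refl _
  · rw [List.getD_eq_getElem pos 0 (Nat.lt_of_le_of_lt h1 h2),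
        List.getD_eq_getElem pos 0 h2]
    exact (List.pairwise_iff_getElem.mp hs) m m' _ _ hlt

lemma idxLE_ge_gt (pos : List Int) (x : Int) (hs : List.Pairwise (· ≤ ·) pos)
    {m : Nat} (h1 : idxLE pos x ≤ m) (h2 : m < pos.length) :
    x < pos.getD m 0 := by
  have hlt : idxLE pos x < pos.length := Nat.lt_of_le_of_lt h1 h2
  have := idxLE_stop pos x hlt
  have hle := sorted_getD pos hs h1 h2
  omega

lemma idxLE_mono (pos : List Int) {x y : Int} (hxy : x ≤ y) :
    idxLE pos x ≤ idxLE pos y := by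
  induction pos with
  | nil => simp [idxLE]
  | cons a t ih =>
    by_cases ha : a ≤ x
    · have hay : a ≤ y := le_trans ha hxy
      simpa [idxLE, List.takeWhile_cons, ha, hay] using ih
    · simp [idxLE, ha]

lemma advJ_eq (pos : List Int) (e : Int) (hs : List.Pairwise (· ≤ ·) pos) :
    ∀ fuel j, pos.length - j ≤ fuel → j ≤ idxLE pos e → advJ pos e j = idxLE pos e := by
  intro fuel
  induction fuel with
  | zero =>
    intro j hf hj
    have := idxLE_le_length pos e
    rw [advJ]
    have : ¬ j < pos.length := by omega
    simp only [this, if_false]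
    omega
  | succ n ihn =>
    intro j hf hj
    rw [advJ]
    by_cases hjl : j < pos.length
    · simp only [hjl, if_true]
      by_cases hle : pos.getD j 0 ≤ e
      · simp only [hle, if_true]
        have hjlt : j < idxLE pos e := by
          rcases Nat.eq_or_lt_of_le hj with rfl | h
          · exact absurd hle (by have := idxLE_ge_gt pos e hs (le_refl _) hjl; omega)
          · exact h
        exact ihn (j + 1) (by omega) hjlt
      · simp only [hle, if_false]
        have : idxLE pos e ≤ j := by
          by_contra hc
          exact hle (idxLE_lt_le pos e j (by omega))
        omega
    · simp only [hjl, if_false]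
      have := idxLE_le_length pos e
      omega

lemma bsGo_eq (pos : List Int) (x : Int) (hs : List.Pairwise (· ≤ ·) pos) :
    ∀ fuel lo hi, hi - lo ≤ fuel → lo ≤ idxLE pos x → idxLE pos x ≤ hi → hi ≤ pos.length →
      bsGo pos x lo hi = idxLE pos x := by
  intro fuel
  induction fuel with
  | zero =>
    intro lo hi hf h1 h2 h3
    rw [bsGo]
    have : ¬ lo < hi := by omega
    simp only [this, if_false]
    omega
  | succ n ihn =>
    intro lo hi hf h1 h2 h3
    rw [bsGo]
    by_cases hlh : lo < hi
    · simp only [hlh, if_true]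
      by_cases hx : x < pos.getD ((lo + hi) / 2) 0
      · simp only [hx, if_true]
        have hmid : idxLE pos x ≤ (lo + hi) / 2 := by
          by_contra hc
          have := idxLE_lt_le pos x ((lo + hi) / 2) (by omega)
          omega
        exact ihn lo ((lo + hi) / 2) (by omega) h1 hmid (by omega)
      · simp only [hx, if_false]
        have hmid : (lo + hi) / 2 < idxLE pos x := by
          by_contra hc
          have := idxLE_ge_gt pos x hs (m := (lo + hi) / 2) (by omega) (by omega)
          omega
        exact ihn ((lo + hi) / 2 + 1) hi (by omega) (by omega) h2 h3
    · simp only [hlh, if_false]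
      omega

lemma advLeftB_eq (pos : List Int) (k p : Int) :
    ∀ fuel left, pos.length - left ≤ fuel → advLeftB pos k p left = advLeftA pos k p left := by
  intro fuel
  induction fuel with
  | zero =>
    intro left hf
    rw [advLeftB, advLeftA]
    have : ¬ left < pos.length := by omega
    simp [this]
  | succ n ihn =>
    intro left hf
    rw [advLeftB, advLeftA]
    by_cases hl : left < pos.length
    · simp only [hl, if_true]
      by_cases hc : p - pos.getD left 0 > k
      · simp only [if_pos hc]
        exact ihn (left + 1) (by omega)
      · simp only [if_neg hc]
    · simp [hl]

-- the left-pointer sequence, current window and best-so-far (A's prefix values)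
def Lp (pos : List Int) (k : Int) : Nat → Nat
  | 0 => 0
  | i + 1 => advLeftA pos k (pos.getD i 0) (Lp pos k i)

def cW (pos : List Int) (k : Int) (r : Nat) : Int := (r : Int) - (Lp pos k (r + 1) : Int) + 1

def Pf (pos : List Int) (k : Int) : Nat → Int
  | 0 => cW pos k 0
  | r + 1 => max (cW pos k (r + 1)) (Pf pos k r)

lemma getD_concat (xs : List Int) (y : Int) (m : Nat) (hm : m < xs.length + 1) :
    (xs ++ [y]).getD m 0 = if m < xs.length then xs.getD m 0 else y := by
  by_cases h : m < xs.length
  · rw [List.getD_eq_getElem _ 0 (by simp; omega), List.getD_eq_getElem _ 0 h]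
    simp [List.getElem_append_left h, h]
  · have : m = xs.length := by omega
    subst this
    rw [List.getD_eq_getElem _ 0 (by simp)]
    simp

lemma loop1A_spec (pos : List Int) (k : Int) :
    ∀ fuel r pre, pos.length - r ≤ fuel → pre.length = r →
      (∀ m, m < r → pre.getD m 0 = Pf pos k m) →
      ∀ m, m < pos.length → (loop1A pos k r (Lp pos k r) pre).getD m 0 = Pf pos k m := by
  intro fuel
  induction fuel with
  | zero =>
    intro r pre hf hlen hinv m hm
    rw [loop1A]
    have : ¬ r < pos.length := by omega
    simp only [this, if_false]
    exact hinv m (by omega)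
  | succ n ihn =>
    intro r pre hf hlen hinv m hm
    rw [loop1A]
    by_cases hr : r < pos.length
    · simp only [hr, if_true]
      have hLp : advLeftA pos k (pos.getD r 0) (Lp pos k r) = Lp pos k (r + 1) := rfl
      rw [hLp]
      set p := if r > 0 then max ((r : Int) - (Lp pos k (r+1) : Int) + 1) (pre.getD (r - 1) 0)
               else (r : Int) - (Lp pos k (r+1) : Int) + 1 with hp
      have hpPf : p = Pf pos k r := by
        cases r with
        | zero => simp [hp, Pf, cW]
        | succ r' =>
          have := hinv r' (by omega)
          simp only [hp, Nat.succ_sub_one, this, gt_iff_lt, Nat.succ_pos, if_true]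
          simp [Pf, cW]
      have := ihn (r + 1) (pre ++ [p]) (by omega) (by simp [hlen])
        (by
          intro m' hm'
          rw [getD_concat pre p m' (by omega)]
          by_cases h' : m' < pre.length
          · simp only [h', if_true]; exact hinv m' (by omega)
          · have : m' = r := by omega
            subst this
            simp only [h', if_false]
            exact hpPf)
        m hm
      exact this
    · simp only [hr, if_false]
      exact hinv m (by omega)

lemma loops_eq (pos : List Int) (k : Int) (hs : List.Pairwise (· ≤ ·) pos) (hk : 0 ≤ k)
    (pre : List Int) (hpre : ∀ m, m < pos.length → pre.getD m 0 = Pf pos k m) :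
    ∀ fuel i j best res, pos.length - i ≤ fuel →
      j = (if i = 0 then 0 else idxLE pos (pos.getD (i - 1) 0 + k)) →
      best = (if i = 0 then 0 else Pf pos k (i - 1)) →
      loopB pos k i (Lp pos k i) j best res = loop2A pos k pre i res := by
  intro fuel
  induction fuel with
  | zero =>
    intro i j best res hf hj hbest
    rw [loopB, loop2A]
    have : ¬ i < pos.length := by omega
    simp [this]
  | succ n ihn =>
    intro i j best res hf hj hbest
    rw [loopB, loop2A]
    by_cases hi : i < pos.length
    · simp only [hi, if_true]
      have hjle : j ≤ idxLE pos (pos.getD i 0 + k) := by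
        cases i with
        | zero => simp at hj; omega
        | succ i' =>
          simp only [Nat.succ_ne_zero, if_false, Nat.succ_sub_one] at hj
          rw [hj]
          exact idxLE_mono pos (by
            have := sorted_getD pos hs (m := i') (m' := i' + 1) (by omega) hi
            omega)
      have hadvJ : advJ pos (pos.getD i 0 + k) j = idxLE pos (pos.getD i 0 + k) :=
        advJ_eq pos _ hs pos.length j (by omega) hjle
      have hbis : bisectRight pos (pos.getD i 0 + k) = idxLE pos (pos.getD i 0 + k) :=
        bsGo_eq pos _ hs pos.length 0 pos.length (by omega) (by omega)
          (idxLE_le_length pos _) (le_refl _)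
      have hfw : (if i > 0 then pre.getD (i - 1) 0 else 0) = best := by
        cases i with
        | zero => simp [hbest]
        | succ i' =>
          simp only [gt_iff_lt, Nat.succ_pos, if_true, Nat.succ_sub_one]
          rw [hpre i' (by omega)]
          simp [hbest]
      have hladv : advLeftB pos k (pos.getD i 0) (Lp pos k i) = Lp pos k (i + 1) := by
        rw [advLeftB_eq pos k _ pos.length _ (by omega)]; rfl
      rw [hadvJ, hbis, hfw, hladv]
      have hbest' : max best ((i : Int) - (Lp pos k (i + 1) : Int) + 1) = Pf pos k i := by
        cases i with
        | zero =>
          have hL1 : Lp pos k 1 = 0 := by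
            show advLeftA pos k (pos.getD 0 0) 0 = 0
            have h0 : ¬ pos.getD 0 0 - pos.getD 0 0 > k := by omega
            rw [advLeftA, if_pos hi, if_neg h0]
          simp only [if_true] at hbest
          simp [hbest, hL1, Pf, cW]
        | succ i' =>
          simp only [Nat.succ_ne_zero, if_false, Nat.succ_sub_one] at hbest
          rw [hbest]
          rw [max_comm]
          rfl
      rw [hbest']
      exact ihn (i + 1) _ _ _ (by omega) (by simp) (by simp)
    · simp [hi]

-- ===== VERDICT (by name: the statement is the Claim_ definition above) =====
theorem maximizeWin_spec : Claim_equal_maximizeWin := by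
  intro pos k _ hpre
  unfold Spec_maximizeWin
  obtain ⟨hs, hek⟩ := hpre
  rcases hek with rfl | hk
  · rw [maximizeWin, maximizeWin_alt, loop1A, loop2A, loopB]
    simp
  · rw [maximizeWin, maximizeWin_alt]
    exact (loops_eq pos k hs hk _
      (loop1A_spec pos k pos.length 0 [] (by omega) rfl (by intro m hm; omega))
      pos.length 0 0 0 0 (by omega) (by simp) (by simp)).symm
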